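-- pv_equiv track=rewrite | github.com/girly6/equip9 | Maintenance Log Analysis.py | preprocess_maintenance_logs
-- ===== SOURCE A (Python) =====
-- from collections import defaultdict
--
-- def preprocess_maintenance_logs(maintenance_logs):
--     cost_by_date = defaultdict(int)
--
--     # Aggregate costs by date
--     for _, date, cost in maintenance_logs:
--         cost_by_date[date] += cost
--
--     # Sort dates and compute prefix sum
--     sorted_dates = sorted(cost_by_date.keys())
--     prefix_sum = {}
--     total = 0
--     for date in sorted_dates:
--         total += cost_by_date[date]
--         prefix_sum[date] = total
--
--     return prefix_sum, sorted_dates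
-- ===== SOURCE B (Python) =====
-- def preprocess_maintenance_logs(maintenance_logs):
--     logs = sorted(maintenance_logs, key=lambda x: x[1])
--     prefix_sum = {}
--     sorted_dates = []
--     total = 0
--     cur_date = None
--     subtotal = 0
--     for _, date, cost in logs:
--         if cur_date is None:
--             cur_date = date
--             subtotal = cost
--         elif date == cur_date:
--             subtotal += cost
--         else:
--             total += subtotal
--             prefix_sum[cur_date] = total
--             sorted_dates.append(cur_date)
--             cur_date = date
--             subtotal = cost
--     if cur_date is not None:
--         total += subtotal
--         prefix_sum[cur_date] = total
--         sorted_dates.append(cur_date)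
--     return prefix_sum, sorted_dates
-- ===== Notes on version B (the rewrite author's own statement) =====
-- stated objective: alternative
-- what changed: Replaces dict-based aggregation followed by a separate key sort and prefix loop with a sort-first single pass: sort the raw logs by date and group consecutive same-date entries, accumulating subtotals and prefix sums as each group closes.
import Mathlib
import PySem

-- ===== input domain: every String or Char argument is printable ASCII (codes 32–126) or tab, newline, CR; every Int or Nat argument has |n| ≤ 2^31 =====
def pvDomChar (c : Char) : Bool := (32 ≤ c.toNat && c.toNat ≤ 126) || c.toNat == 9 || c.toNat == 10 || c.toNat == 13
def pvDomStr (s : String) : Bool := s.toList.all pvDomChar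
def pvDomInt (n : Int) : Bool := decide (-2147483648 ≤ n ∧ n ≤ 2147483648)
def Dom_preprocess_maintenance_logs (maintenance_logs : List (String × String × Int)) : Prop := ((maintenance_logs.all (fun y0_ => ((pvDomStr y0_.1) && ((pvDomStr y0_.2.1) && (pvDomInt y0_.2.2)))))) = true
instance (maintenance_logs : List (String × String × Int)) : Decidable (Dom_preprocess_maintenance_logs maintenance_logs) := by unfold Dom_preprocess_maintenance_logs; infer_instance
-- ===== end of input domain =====

-- B replaces A's dict aggregation + separate key-sort + prefix loop by sort-the-logs-first and one
-- group-and-accumulate pass over consecutive same-date entries (objective: alternative decomposition).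

-- ===== PORT A =====
def preprocess_maintenance_logs (maintenance_logs : List (String × String × Int)) : (List (String × Int)) × List String :=
  -- cost_by_date = defaultdict(int); for _, date, cost in logs: cost_by_date[date] += cost
  let cost_by_date : PySem.Dict String Int :=
    maintenance_logs.foldl (fun d x => d.modify x.2.1 0 (fun v => v + x.2.2)) PySem.Dict.empty
  -- sorted_dates = sorted(cost_by_date.keys())
  let sorted_dates := PySem.List.sorted cost_by_date.keys (fun x => x) false
  -- prefix_sum = {}; total = 0; for date in sorted_dates: total += cost_by_date[date]; prefix_sum[date] = total
  let pr := sorted_dates.foldl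
    (fun (st : PySem.Dict String Int × Int) date =>
      let total := st.2 + cost_by_date.getD date 0
      (st.1.insert date total, total))
    (PySem.Dict.empty, (0 : Int))
  (pr.1.items, sorted_dates)

-- ===== PORT B =====
-- loop body of B: state = (prefix_sum, sorted_dates, total, cur_date, subtotal)
def pvStepB (st : PySem.Dict String Int × List String × Int × Option String × Int)
    (x : String × String × Int) : PySem.Dict String Int × List String × Int × Option String × Int :=
  match st.2.2.2.1 with
  | none => (st.1, st.2.1, st.2.2.1, some x.2.1, x.2.2)
  | some c =>
    if x.2.1 = c then (st.1, st.2.1, st.2.2.1, some c, st.2.2.2.2 + x.2.2)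
    else (st.1.insert c (st.2.2.1 + st.2.2.2.2), st.2.1 ++ [c], st.2.2.1 + st.2.2.2.2, some x.2.1, x.2.2)

-- trailing 'if cur_date is not None: …' flush of B
def pvFinB (st : PySem.Dict String Int × List String × Int × Option String × Int) :
    (List (String × Int)) × List String :=
  match st.2.2.2.1 with
  | none => (st.1.items, st.2.1)
  | some c => ((st.1.insert c (st.2.2.1 + st.2.2.2.2)).items, st.2.1 ++ [c])

def preprocess_maintenance_logs_alt (maintenance_logs : List (String × String × Int)) : (List (String × Int)) × List String :=
  let logs := PySem.List.sorted maintenance_logs (fun x => x.2.1) false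
  pvFinB (logs.foldl pvStepB (PySem.Dict.empty, [], (0 : Int), none, (0 : Int)))

-- ===== PRECONDITION & SPEC =====
def Spec_preprocess_maintenance_logs (maintenance_logs : List (String × String × Int)) (out : (List (String × Int)) × List String) : Prop := out = preprocess_maintenance_logs_alt maintenance_logs
instance (maintenance_logs : List (String × String × Int)) (out : (List (String × Int)) × List String) : Decidable (Spec_preprocess_maintenance_logs maintenance_logs out) := by unfold Spec_preprocess_maintenance_logs; infer_instance

-- ===== CLAIM (what is proved, stated in full; the proofs are below) =====
def Claim_equal_preprocess_maintenance_logs : Prop := ∀ (maintenance_logs : List (String × String × Int)), Dom_preprocess_maintenance_logs maintenance_logs → Spec_preprocess_maintenance_logs maintenance_logs (preprocess_maintenance_logs maintenance_logs)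

-- ===== LEMMAS AND PROOFS =====

-- total cost of the entries of l dated d
def pvSumCosts (l : List (String × String × Int)) (d : String) : Int :=
  ((l.filter (fun x => x.2.1 == d)).map (fun x => x.2.2)).sum

-- prefix-sum association list over a date list
def pvPrefix (g : String → Int) : List String → Int → List (String × Int)
  | [], _ => []
  | d :: rest, t => (d, t + g d) :: pvPrefix g rest (t + g d)

lemma pvPrefix_cons (g : String → Int) (d : String) (l : List String) (t : Int) :
    pvPrefix g (d :: l) t = (d, t + g d) :: pvPrefix g l (t + g d) := rfl

lemma pvSumCosts_nil (d : String) : pvSumCosts [] d = 0 := rfl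

lemma pvSumCosts_cons (x : String × String × Int) (l : List (String × String × Int)) (d : String) :
    pvSumCosts (x :: l) d = (if x.2.1 = d then x.2.2 else 0) + pvSumCosts l d := by
  by_cases h : x.2.1 = d <;> simp [pvSumCosts, h]

lemma pvSumCosts_eq_zero (l : List (String × String × Int)) (d : String)
    (h : ∀ x ∈ l, x.2.1 ≠ d) : pvSumCosts l d = 0 := by
  induction l with
  | nil => rfl
  | cons x t ih =>
    rw [pvSumCosts_cons, if_neg (h x (by simp)), ih (fun y hy => h y (by simp [hy]))]
    simp

lemma pvSumCosts_perm (l l' : List (String × String × Int)) (h : l.Perm l') (d : String) :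
    pvSumCosts l d = pvSumCosts l' d := by
  unfold pvSumCosts
  exact List.Perm.sum_eq (List.Perm.map _ (List.Perm.filter _ h))

lemma pvPrefix_congr (g g' : String → Int) (l : List String) (t : Int)
    (h : ∀ d ∈ l, g d = g' d) : pvPrefix g l t = pvPrefix g' l t := by
  induction l generalizing t with
  | nil => rfl
  | cons d rest ih =>
    simp only [pvPrefix, h d (by simp)]
    rw [ih _ (fun e he => h e (by simp [he]))]

-- A's aggregation dict: values
lemma pvA_getD (l : List (String × String × Int)) (dct : PySem.Dict String Int) (v : String) :
    (l.foldl (fun d x => d.modify x.2.1 0 (fun w => w + x.2.2)) dct).getD v 0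
      = dct.getD v 0 + pvSumCosts l v := by
  induction l generalizing dct with
  | nil => simp [pvSumCosts_nil]
  | cons x t ih =>
    rw [List.foldl_cons, ih, pvSumCosts_cons, PySem.Dict.getD_modify]
    by_cases h : v = x.2.1
    · simp [h]; ring
    · rw [if_neg h, if_neg (fun he => h he.symm)]; ring

-- A's prefix loop appends fresh keys in order
lemma pvA_fold (f : String → Int) (ds : List String) (ps : PySem.Dict String Int) (t : Int)
    (hnd : ds.Nodup) (hfresh : ∀ d ∈ ds, ps.contains d = false) :
    (ds.foldl (fun (st : PySem.Dict String Int × Int) d =>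
        let total := st.2 + f d
        (st.1.insert d total, total)) (ps, t)).1.items
      = ps.items ++ pvPrefix f ds t := by
  induction ds generalizing ps t with
  | nil => simp [pvPrefix]
  | cons d rest ih =>
    rw [List.foldl_cons]
    have hnd' := (List.nodup_cons.mp hnd)
    rw [ih (ps.insert d (t + f d)) (t + f d) hnd'.2 ?_]
    · rw [PySem.Dict.items_insert_of_not_contains _ _ (hfresh d (by simp))]
      simp [pvPrefix]
    · intro e he
      rw [PySem.Dict.contains_insert]
      have : e ≠ d := fun h => hnd'.1 (h ▸ he)
      simp [this, hfresh e (by simp [he])]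

-- PySem.Set.add / dedup facts
lemma pvFoldlAdd_cons_of_not_mem (l : List String) (s : List String) (a : String) (h : a ∉ l) :
    l.foldl PySem.Set.add (a :: s) = a :: l.foldl PySem.Set.add s := by
  induction l generalizing s with
  | nil => rfl
  | cons x t ih =>
    have hxa : x ≠ a := fun he => h (by simp [he])
    rw [List.foldl_cons, List.foldl_cons]
    have hadd : PySem.Set.add (a :: s) x = a :: PySem.Set.add s x := by
      simp [PySem.Set.add, PySem.Set.contains, hxa]
      split_ifs <;> simp
    rw [hadd, ih _ (fun hm => h (by simp [hm]))]

lemma pvDedup_cons_of_not_mem (a : String) (l : List String) (h : a ∉ l) :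
    PySem.List.dedup (a :: l) = a :: PySem.List.dedup l := by
  show (a :: l).foldl PySem.Set.add [] = a :: l.foldl PySem.Set.add []
  rw [List.foldl_cons]
  have : PySem.Set.add ([] : List String) a = [a] := rfl
  rw [this]
  exact pvFoldlAdd_cons_of_not_mem l [] a h

lemma pvDedup_cons_dup (a : String) (l : List String) :
    PySem.List.dedup (a :: a :: l) = PySem.List.dedup (a :: l) := by
  show (a :: a :: l).foldl PySem.Set.add [] = (a :: l).foldl PySem.Set.add []
  have h2 : PySem.Set.add (PySem.Set.add [] a) a = PySem.Set.add ([] : List String) a := by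
    simp [PySem.Set.add, PySem.Set.contains]
  simp only [List.foldl_cons, h2]

lemma pvDedup_sublist (l : List String) : (PySem.List.dedup l).Sublist l := by
  suffices h : ∀ (l s : List String), (l.foldl PySem.Set.add s).Sublist (s ++ l) by
    have := h l []
    simpa using this
  intro l
  induction l with
  | nil => simp
  | cons x t ih =>
    intro s
    rw [List.foldl_cons]
    refine (ih (PySem.Set.add s x)).trans ?_
    by_cases h : PySem.Set.contains s x = true
    · rw [show PySem.Set.add s x = s by unfold PySem.Set.add; rw [if_pos h]]
      exact List.Sublist.append_left (List.sublist_cons_self x t) s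
    · rw [show PySem.Set.add s x = s ++ [x] by unfold PySem.Set.add; rw [if_neg h]]
      simp

-- B's grouping loop, started inside a group with pending date c
lemma pvB_group (s : List (String × String × Int)) :
    ∀ (ps : PySem.Dict String Int) (sd : List String) (t sub : Int) (c : String),
    (s.map (fun x => x.2.1)).Pairwise (· ≤ ·) →
    (∀ x ∈ s, c ≤ x.2.1) →
    (∀ d, (d = c ∨ d ∈ s.map (fun x => x.2.1)) → ps.contains d = false) →
    pvFinB (s.foldl pvStepB (ps, sd, t, some c, sub))
      = (ps.items ++ pvPrefix (fun d => (if d = c then sub else 0) + pvSumCosts s d)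
            (PySem.List.dedup (c :: s.map (fun x => x.2.1))) t,
         sd ++ PySem.List.dedup (c :: s.map (fun x => x.2.1))) := by
  induction s with
  | nil =>
    intro ps sd t sub c _ _ hfresh
    simp only [List.foldl_nil, List.map_nil, pvFinB]
    have hd : PySem.List.dedup [c] = [c] := rfl
    rw [hd]
    rw [PySem.Dict.items_insert_of_not_contains _ _ (hfresh c (Or.inl rfl))]
    simp [pvPrefix, pvSumCosts_nil]
  | cons x rest ih =>
    intro ps sd t sub c hpw hge hfresh
    have hpw2 := hpw
    rw [List.map_cons, List.pairwise_cons] at hpw2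
    have hpw' : (rest.map (fun x => x.2.1)).Pairwise (· ≤ ·) := hpw2.2
    have hxle : ∀ y ∈ rest, x.2.1 ≤ y.2.1 := by
      intro y hy; exact hpw2.1 y.2.1 (List.mem_map.mpr ⟨y, hy, rfl⟩)
    rw [List.foldl_cons]
    by_cases h : x.2.1 = c
    · -- same date: absorb into subtotal
      have hstep : pvStepB (ps, sd, t, some c, sub) x = (ps, sd, t, some c, sub + x.2.2) := by
        simp [pvStepB, h]
      rw [hstep, ih ps sd t (sub + x.2.2) c hpw'
        (fun y hy => hge y (by simp [hy]))
        (fun d hd => hfresh d (hd.imp id (fun h1 => by rw [List.map_cons]; exact List.mem_cons_of_mem _ h1)))]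
      have hded : PySem.List.dedup (c :: (x :: rest).map (fun x => x.2.1))
          = PySem.List.dedup (c :: rest.map (fun x => x.2.1)) := by
        simp only [List.map_cons, h]
        exact pvDedup_cons_dup c _
      rw [hded]
      have hg : (fun d => (if d = c then sub + x.2.2 else 0) + pvSumCosts rest d)
          = (fun d => (if d = c then sub else 0) + pvSumCosts (x :: rest) d) := by
        funext d
        rw [pvSumCosts_cons]
        by_cases hd : d = c
        · rw [if_pos hd, if_pos hd, if_pos (h.trans hd.symm)]; ring
        · rw [if_neg hd, if_neg hd, if_neg (fun he => hd (he.symm.trans h))]; ring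
      rw [hg]
    · -- new date: flush group c
      have hlt : c < x.2.1 := lt_of_le_of_ne (hge x (by simp)) (fun he => h he.symm)
      have hstep : pvStepB (ps, sd, t, some c, sub)  x
          = (ps.insert c (t + sub), sd ++ [c], t + sub, some x.2.1, x.2.2) := by
        simp [pvStepB, h]
      have hrestgt : ∀ y ∈ x :: rest, c < y.2.1 := by
        intro y hy
        rcases List.mem_cons.mp hy with h1 | h1
        · exact h1 ▸ hlt
        · exact lt_of_lt_of_le hlt (hxle y h1)
      rw [hstep, ih (ps.insert c (t + sub)) (sd ++ [c]) (t + sub) x.2.2 x.2.1 hpw' hxle ?_]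
      · have hcnot : c ∉ (x :: rest).map (fun x => x.2.1) := by
          intro hm
          rcases List.mem_map.mp hm with ⟨y, hy, hyc⟩
          exact absurd (hyc ▸ hrestgt y hy) (lt_irrefl c)
        have hded : PySem.List.dedup (c :: (x :: rest).map (fun x => x.2.1))
            = c :: PySem.List.dedup ((x :: rest).map (fun x => x.2.1)) :=
          pvDedup_cons_of_not_mem c _ hcnot
        rw [hded]
        rw [PySem.Dict.items_insert_of_not_contains _ _ (hfresh c (Or.inl rfl))]
        have hsc : pvSumCosts (x :: rest) c = 0 :=
          pvSumCosts_eq_zero _ _ (fun y hy => ne_of_gt (hrestgt y hy))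
        simp only [List.map_cons]
        rw [pvPrefix_cons]
        have hg0 : (if c = c then sub else 0) + pvSumCosts (x :: rest) c = sub := by
          rw [if_pos rfl, hsc]; ring
        rw [hg0]
        have hgc : pvPrefix (fun d => (if d = x.2.1 then x.2.2 else 0) + pvSumCosts rest d)
              (PySem.List.dedup (x.2.1 :: rest.map (fun x => x.2.1))) (t + sub)
            = pvPrefix (fun d => (if d = c then sub else 0) + pvSumCosts (x :: rest) d)
              (PySem.List.dedup (x.2.1 :: rest.map (fun x => x.2.1))) (t + sub) := by
          apply pvPrefix_congr
          intro d hd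
          have hdm : d ∈ (x :: rest).map (fun x => x.2.1) := by
            have := (pvDedup_sublist _).mem hd
            simpa using this
          have hdc : d ≠ c := fun he => hcnot (he ▸ hdm)
          rw [pvSumCosts_cons, if_neg hdc]
          by_cases hdx : x.2.1 = d
          · rw [if_pos hdx.symm, if_pos hdx]; ring
          · rw [if_neg (fun he => hdx he.symm), if_neg hdx]; ring
        rw [hgc]
        simp [List.append_assoc]
      · intro d hd
        rw [PySem.Dict.contains_insert]
        have hdm : d ∈ (x :: rest).map (fun y => y.2.1) := by
          rw [List.map_cons]
          rcases hd with h1 | h1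
          · exact h1 ▸ List.mem_cons_self
          · exact List.mem_cons_of_mem _ h1
        have hdc : d ≠ c := by
          rcases List.mem_map.mp hdm with ⟨y, hy, hyc⟩
          exact fun he => absurd (hyc ▸ hrestgt y hy) (he ▸ lt_irrefl c)
        simp [hdc, hfresh d (Or.inr hdm)]

-- A's dict holds the per-date sums and the distinct dates
lemma pvA_cbd_getD (logs : List (String × String × Int)) (v : String) :
    (logs.foldl (fun d x => d.modify x.2.1 0 (fun w => w + x.2.2)) PySem.Dict.empty).getD v 0
      = pvSumCosts logs v := by
  rw [pvA_getD, PySem.Dict.getD_empty]; ring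

lemma pvA_cbd_keys (logs : List (String × String × Int)) :
    (logs.foldl (fun d x => d.modify x.2.1 0 (fun w => w + x.2.2)) PySem.Dict.empty).keys
      = PySem.Set.ofList (logs.map (fun x => x.2.1)) := by
  rw [PySem.Dict.keys_foldl_modify_key logs (fun x => x.2.1) 0 (fun _ x => fun w => w + x.2.2)
    PySem.Dict.empty, PySem.Dict.keys_empty, PySem.Set.update_nil_left]

-- the two date orders coincide
lemma pvDates_eq (logs : List (String × String × Int)) :
    PySem.List.sorted
        (logs.foldl (fun d x => d.modify x.2.1 0 (fun w => w + x.2.2)) PySem.Dict.empty).keys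
        (fun x => x) false
      = PySem.List.dedup ((PySem.List.sorted logs (fun x => x.2.1) false).map (fun x => x.2.1)) := by
  apply PySem.List.sorted_eq_of_perm_of_pairwise_lt
  · rw [pvA_cbd_keys]
    refine (List.perm_ext_iff_of_nodup (PySem.List.nodup_dedup _) (PySem.Set.nodup_ofList _)).mpr ?_
    intro a
    rw [PySem.List.mem_dedup, PySem.Set.mem_ofList,
      ((PySem.List.sorted_perm logs (fun x => x.2.1) false).map (fun x => x.2.1)).mem_iff]
  · have hle : ((PySem.List.sorted logs (fun x => x.2.1) false).map (fun x => x.2.1)).Pairwise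
        (fun a b => a ≤ b) := PySem.List.sorted_map_key_pairwise logs (fun x => x.2.1)
    have hle' := hle.sublist (pvDedup_sublist _)
    have hne : (PySem.List.dedup ((PySem.List.sorted logs (fun x => x.2.1) false).map
        (fun x => x.2.1))).Pairwise (fun a b => a ≠ b) := PySem.List.nodup_dedup _
    exact (hle'.and hne).imp (fun h => lt_of_le_of_ne h.1 h.2)

-- ===== VERDICT (by name: the statement is the Claim_ definition above) =====
theorem preprocess_maintenance_logs_spec : Claim_equal_preprocess_maintenance_logs := by
  intro logs _
  show preprocess_maintenance_logs logs = preprocess_maintenance_logs_alt logs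
  cases hs : PySem.List.sorted logs (fun x => x.2.1) false with
  | nil =>
    have hlogs : logs = [] := (PySem.List.sorted_eq_nil_iff _ _ _).mp hs
    subst hlogs; rfl
  | cons x rest =>
    -- B side
    have hB : preprocess_maintenance_logs_alt logs
        = pvFinB ((x :: rest).foldl pvStepB (PySem.Dict.empty, [], (0 : Int), none, (0 : Int))) := by
      simp only [preprocess_maintenance_logs_alt]
      rw [hs]
    have hpwS := PySem.List.sorted_map_key_pairwise logs (fun x => x.2.1)
    rw [hs, List.map_cons, List.pairwise_cons] at hpwS
    have hstep0 : pvStepB (PySem.Dict.empty, [], (0 : Int), none, (0 : Int))  x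
        = (PySem.Dict.empty, [], (0 : Int), some x.2.1, x.2.2) := rfl
    rw [hB, List.foldl_cons, hstep0,
      pvB_group rest PySem.Dict.empty [] 0 x.2.2 x.2.1 hpwS.2
        (fun y hy => hpwS.1 y.2.1 (List.mem_map.mpr ⟨y, hy, rfl⟩))
        (fun d _ => PySem.Dict.contains_empty d)]
    -- A side
    have hAfold := pvA_fold
      (fun e => (logs.foldl (fun d x => d.modify x.2.1 0 (fun w => w + x.2.2))
        PySem.Dict.empty).getD e 0)
      (PySem.List.sorted
        (logs.foldl (fun d x => d.modify x.2.1 0 (fun w => w + x.2.2)) PySem.Dict.empty).keys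
        (fun x => x) false)
      PySem.Dict.empty 0
      (by rw [pvDates_eq, hs]; exact PySem.List.nodup_dedup _)
      (fun d _ => PySem.Dict.contains_empty d)
    have hA : preprocess_maintenance_logs logs
        = (pvPrefix
            (fun e => (logs.foldl (fun d x => d.modify x.2.1 0 (fun w => w + x.2.2))
              PySem.Dict.empty).getD e 0)
            (PySem.List.sorted
              (logs.foldl (fun d x => d.modify x.2.1 0 (fun w => w + x.2.2))
                PySem.Dict.empty).keys (fun x => x) false) 0,
           PySem.List.sorted
             (logs.foldl (fun d x => d.modify x.2.1 0 (fun w => w + x.2.2))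
               PySem.Dict.empty).keys (fun x => x) false) := by
      simp only [preprocess_maintenance_logs]
      rw [Prod.mk.injEq]
      refine ⟨?_, rfl⟩
      rw [show ((PySem.Dict.empty : PySem.Dict String Int).items) = [] from rfl] at hAfold
      rw [List.nil_append] at hAfold
      exact hAfold
    rw [hA, pvDates_eq, hs]
    rw [Prod.mk.injEq]
    refine ⟨?_, by simp⟩
    rw [List.map_cons]
    rw [show ((PySem.Dict.empty : PySem.Dict String Int).items) = [] from rfl, List.nil_append]
    rw [pvPrefix_congr _ (pvSumCosts logs) _ 0 (fun d _ => pvA_cbd_getD logs d)]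
    apply pvPrefix_congr
    intro d _
    have hperm : pvSumCosts logs d = pvSumCosts (x :: rest) d := by
      rw [pvSumCosts_perm logs (x :: rest) (hs ▸ (PySem.List.sorted_perm logs (fun x => x.2.1) false).symm) d]
    rw [hperm, pvSumCosts_cons]
    by_cases hdx : x.2.1 = d
    · simp [hdx]
    · rw [if_neg hdx, if_neg (fun he => hdx he.symm)]
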